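-- pv_equiv track=rewrite | github.com/VisLab/hed-task | src/hed_task/download_pubmed.py | parse_article_ids
-- ===== SOURCE A (Python) =====
-- def parse_article_ids(article_id_list: list[str]) -> tuple[str, str, str, list[str]]:
--     """
--     Parse ArticleIdList to extract pmid, pmcid, doi, and other IDs.
--
--     Args:
--         article_id_list: List of article IDs from PubMed record
--
--     Returns:
--         Tuple of (pmid, pmcid, doi, other_ids)
--     """
--     pmid = ""
--     pmcid = ""
--     doi = ""
--     other_ids = []
--
--     for article_id in article_id_list:
--         article_id_str = str(article_id)
--
--         # Check if it's a DOI (starts with 10.)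
--         if article_id_str.startswith("10."):
--             doi = article_id_str
--         # Check if it's a PMC ID (starts with PMC or is all digits as PMID)
--         elif article_id_str.startswith("PMC"):
--             pmcid = article_id_str
--         # Check if it's likely a PMID (all digits)
--         elif article_id_str.isdigit():
--             pmid = article_id_str
--         else:
--             # Everything else goes to other_ids
--             other_ids.append(article_id_str)
--
--     return pmid, pmcid, doi, other_ids
-- ===== SOURCE B (Python) =====
-- def parse_article_ids(article_id_list: list[str]) -> tuple[str, str, str, list[str]]:
--     """Categorize article IDs into pmid/pmcid/doi/other via independent passes."""
--     strs = [str(a) for a in article_id_list]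
--     doi = next((s for s in reversed(strs) if s.startswith("10.")), "")
--     pmcid = next((s for s in reversed(strs) if s.startswith("PMC")), "")
--     pmid = next((s for s in reversed(strs) if s.isdigit()), "")
--     other_ids = [s for s in strs
--                  if not (s.startswith("10.") or s.startswith("PMC") or s.isdigit())]
--     return pmid, pmcid, doi, other_ids
-- ===== Notes on version B (the rewrite author's own statement) =====
-- stated objective: simpler
-- what changed: Replaces A's single stateful classifying loop (four mutable accumulators, elif chain) by independent passes: each scalar is the first match of a reverse scan for its own predicate (defaulting to ""), and other_ids is a forward filter keeping elements matching none of the three predicates.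
import Mathlib
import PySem

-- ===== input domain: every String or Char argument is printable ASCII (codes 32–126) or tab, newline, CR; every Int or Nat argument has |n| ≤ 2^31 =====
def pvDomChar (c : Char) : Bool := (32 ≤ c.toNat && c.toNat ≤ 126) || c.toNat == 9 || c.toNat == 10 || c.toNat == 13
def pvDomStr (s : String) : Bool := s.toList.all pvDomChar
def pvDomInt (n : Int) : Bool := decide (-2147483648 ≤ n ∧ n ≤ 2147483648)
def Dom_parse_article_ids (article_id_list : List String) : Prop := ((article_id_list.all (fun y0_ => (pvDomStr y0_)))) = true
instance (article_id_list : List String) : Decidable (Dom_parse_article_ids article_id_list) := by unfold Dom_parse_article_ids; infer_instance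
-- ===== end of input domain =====

-- B replaces A's single classifying fold by independent reverse searches for each
-- scalar (last match wins) and a forward filter for other_ids (objective: simpler).

-- ===== PORT A =====
-- one pass, overwriting pmid/pmcid/doi, appending unmatched ids
def pvStepA (st : String × String × String × List String) (s : String) :
    String × String × String × List String :=
  if PySem.Str.startswith s "10." then (st.1, st.2.1, s, st.2.2.2)
  else if PySem.Str.startswith s "PMC" then (st.1, s, st.2.2.1, st.2.2.2)
  else if PySem.Str.strIsdigit s then (s, st.2.1, st.2.2.1, st.2.2.2)
  else (st.1, st.2.1, st.2.2.1, st.2.2.2 ++ [s])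

def parse_article_ids (article_id_list : List String) :
    String × String × String × List String :=
  article_id_list.foldl pvStepA ("", "", "", [])

-- ===== PORT B =====
-- next((s for s in reversed(strs) if p(s)), "")
def pvLastMatch (strs : List String) (p : String → Bool) : String :=
  (strs.reverse.find? p).getD ""

def parse_article_ids_alt (article_id_list : List String) :
    String × String × String × List String :=
  let strs := article_id_list
  let doi := pvLastMatch strs (fun s => PySem.Str.startswith s "10.")
  let pmcid := pvLastMatch strs (fun s => PySem.Str.startswith s "PMC")
  let pmid := pvLastMatch strs (fun s => PySem.Str.strIsdigit s)
  let other_ids := strs.filter (fun s =>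
    !(PySem.Str.startswith s "10." || PySem.Str.startswith s "PMC" || PySem.Str.strIsdigit s))
  (pmid, pmcid, doi, other_ids)

-- ===== PRECONDITION & SPEC =====
def Spec_parse_article_ids (article_id_list : List String) (out : String × String × String × List String) : Prop := out = parse_article_ids_alt article_id_list
instance (article_id_list : List String) (out : String × String × String × List String) : Decidable (Spec_parse_article_ids article_id_list out) := by unfold Spec_parse_article_ids; infer_instance

-- ===== CLAIM (what is proved, stated in full; the proofs are below) =====
def Claim_equal_parse_article_ids : Prop := ∀ (article_id_list : List String), Dom_parse_article_ids article_id_list → Spec_parse_article_ids article_id_list (parse_article_ids article_id_list)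

-- ===== LEMMAS AND PROOFS =====

-- a digit string cannot start with "10." ('.' is not a digit)
theorem not_digit_of_starts_ten (s : String)
    (h : PySem.Str.startswith s "10." = true) : PySem.Str.strIsdigit s = false := by
  simp only [PySem.Str.startswith_eq, PySem.Str.strIsdigit_eq] at *
  rw [PySem.Chars.startswith_iff] at h
  obtain ⟨t, ht⟩ := h
  rw [← ht]
  simp [PySem.Chars.strIsdigit, PySem.Chars.isdigit]

-- a digit string cannot start with "PMC"
theorem not_digit_of_starts_pmc (s : String)
    (h : PySem.Str.startswith s "PMC" = true) : PySem.Str.strIsdigit s = false := by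
  simp only [PySem.Str.startswith_eq, PySem.Str.strIsdigit_eq] at *
  rw [PySem.Chars.startswith_iff] at h
  obtain ⟨t, ht⟩ := h
  rw [← ht]
  simp [PySem.Chars.strIsdigit, PySem.Chars.isdigit]

-- "10." and "PMC" prefixes are mutually exclusive
theorem not_ten_of_starts_pmc (s : String)
    (h : PySem.Str.startswith s "PMC" = true) : PySem.Str.startswith s "10." = false := by
  simp only [PySem.Str.startswith_eq] at *
  rw [PySem.Chars.startswith_iff] at h
  obtain ⟨t, ht⟩ := h
  rw [Bool.eq_false_iff]
  intro h10
  rw [PySem.Chars.startswith_iff] at h10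
  obtain ⟨u, hu⟩ := h10
  rw [← ht] at hu
  simp at hu

theorem getD_find?_append (xs : List String) (s : String) (p : String → Bool) (d : String) :
    (((xs ++ [s]).find? p).getD d) = (xs.find? p).getD (if p s then s else d) := by
  cases h : xs.find? p with
  | none => simp [List.find?_append, h, List.find?]; split <;> simp_all
  | some v => simp [List.find?_append, h]

theorem foldA_char (l : List String) (p m d : String) (o : List String) :
    l.foldl pvStepA (p, m, d, o) =
      ((l.reverse.find? (fun s => PySem.Str.strIsdigit s)).getD p,
       (l.reverse.find? (fun s => PySem.Str.startswith s "PMC")).getD m,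
       (l.reverse.find? (fun s => PySem.Str.startswith s "10.")).getD d,
       o ++ l.filter (fun s =>
         !(PySem.Str.startswith s "10." || PySem.Str.startswith s "PMC" || PySem.Str.strIsdigit s))) := by
  induction l generalizing p m d o with
  | nil => simp
  | cons s t ih =>
    rw [List.foldl_cons, List.reverse_cons, getD_find?_append, getD_find?_append,
        getD_find?_append, List.filter_cons]
    by_cases h1 : PySem.Str.startswith s "10." = true
    · have h2 : PySem.Str.startswith s "PMC" = false := by
        rw [Bool.eq_false_iff]; intro hp
        rw [not_ten_of_starts_pmc s hp] at h1; exact Bool.false_ne_true h1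
      have h3 := not_digit_of_starts_ten s h1
      simp only [pvStepA, h1, h2, h3, if_pos, if_neg, Bool.false_eq_true, not_false_iff]
      rw [ih]
      simp [h1, h2, h3]
    · by_cases h2 : PySem.Str.startswith s "PMC" = true
      · have h3 := not_digit_of_starts_pmc s h2
        simp only [pvStepA, h1, h2, h3, if_pos, if_neg, Bool.false_eq_true, not_false_iff]
        rw [ih]
        simp [h1, h2, h3]
      · by_cases h3 : PySem.Str.strIsdigit s = true
        · simp only [pvStepA, h1, h2, h3, if_pos, if_neg]
          rw [ih]
          simp [h1, h2, h3]
        · simp only [pvStepA, h1, h2, h3, if_neg]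
          rw [ih]
          simp [h1, h2, h3]

-- ===== VERDICT (by name: the statement is the Claim_ definition above) =====
theorem parse_article_ids_spec : Claim_equal_parse_article_ids := by
  intro l _
  unfold Spec_parse_article_ids parse_article_ids parse_article_ids_alt pvLastMatch
  rw [foldA_char]
  simp
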